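-- pv_equiv track=rewrite | github.com/ESI-FAR/tesops-flowchart-graphviz | www/app.py | compute_functions
-- ===== SOURCE A (Python) =====
-- def make_product(edge_label_name, variable_name):
--     """Create a string representing the product of a edge label and a node name"""
--     if variable_name == "1":
--         return edge_label_name
--     else:
--         return f"{edge_label_name}*{variable_name}"
--
-- def compute_functions(edges):
--      """Compute mathematical functions representing the edge collection and return them as strings"""
--      functions = {}
--      try:
--          for edge in edges:
--              if edge[1] in functions:
--                  functions[edge[1]] += f" + " + make_product(edge[2], edge[0])
--              else:
--                  functions[edge[1]] = f"{edge[1]} = {make_product(edge[2], edge[0])}"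
--      except:
--          pass
--      return f"""<br><strong>Functions</strong><p>{'<br>'.join([functions[key] for key in functions])}</p>"""
-- ===== SOURCE B (Python) =====
-- def make_product(edge_label_name, variable_name):
--     """Create a string representing the product of a edge label and a node name"""
--     if variable_name == "1":
--         return edge_label_name
--     else:
--         return f"{edge_label_name}*{variable_name}"
--
-- def compute_functions(edges):
--     """Compute mathematical functions representing the edge collection and return them as strings"""
--     # Stage 1: the distinct target nodes, in first-occurrence order.
--     keys = []
--     for edge in edges:
--         if edge[1] not in keys:
--             keys.append(edge[1])
--     # Stage 2: for each target node, rescan the edge list for its terms and format the line.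
--     lines = []
--     for key in keys:
--         terms = [make_product(edge[2], edge[0]) for edge in edges if edge[1] == key]
--         lines.append(f"{key} = {' + '.join(terms)}")
--     return f"""<br><strong>Functions</strong><p>{'<br>'.join(lines)}</p>"""
-- ===== Notes on version B (the rewrite author's own statement) =====
-- stated objective: alternative
-- what changed: B replaces A's single-pass dict of growing strings by two staged passes with no dict at all: first collect the distinct target keys in first-occurrence order, then for each key rescan the whole edge list to gather its terms and format the line once.
import Mathlib
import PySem

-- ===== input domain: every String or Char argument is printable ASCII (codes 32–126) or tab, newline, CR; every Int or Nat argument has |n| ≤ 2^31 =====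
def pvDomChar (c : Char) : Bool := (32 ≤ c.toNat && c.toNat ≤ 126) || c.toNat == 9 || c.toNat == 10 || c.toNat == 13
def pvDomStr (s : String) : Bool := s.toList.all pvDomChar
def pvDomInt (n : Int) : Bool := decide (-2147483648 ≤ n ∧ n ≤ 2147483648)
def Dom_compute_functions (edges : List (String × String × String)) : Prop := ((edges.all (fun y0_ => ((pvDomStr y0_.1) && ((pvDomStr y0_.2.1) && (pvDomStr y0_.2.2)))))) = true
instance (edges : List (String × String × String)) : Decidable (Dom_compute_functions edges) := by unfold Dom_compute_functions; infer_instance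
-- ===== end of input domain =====

-- B drops A's dict of progressively concatenated strings: it first collects the distinct
-- keys in first-occurrence order, then rescans the edges per key (objective: alternative).

-- ===== PORT A =====
def make_product (edge_label_name variable_name : String) : String :=
  if variable_name = "1" then edge_label_name
  else edge_label_name ++ "*" ++ variable_name

def compute_functions (edges : List (String × String × String)) : String :=
  let functions : PySem.Dict String String :=
    edges.foldl (fun d edge =>
      if d.contains edge.2.1 then
        d.modify edge.2.1 "" (fun s => s ++ " + " ++ make_product edge.2.2 edge.1)
      else
        d.insert edge.2.1 (edge.2.1 ++ " = " ++ make_product edge.2.2 edge.1))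
      PySem.Dict.empty
  "<br><strong>Functions</strong><p>" ++
    PySem.Str.join "<br>" (functions.keys.map (fun k => functions.getD k "")) ++ "</p>"

-- ===== PORT B =====
def make_product_alt (edge_label_name variable_name : String) : String :=
  if variable_name = "1" then edge_label_name
  else edge_label_name ++ "*" ++ variable_name

def compute_functions_alt (edges : List (String × String × String)) : String :=
  -- stage 1: distinct keys, first-occurrence order ('if edge[1] not in keys: keys.append')
  let keys : List String :=
    edges.foldl (fun ks e => if ks.contains e.2.1 then ks else ks ++ [e.2.1]) []
  -- stage 2: per key, rescan all edges for its terms and format the line once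
  let lines : List String :=
    keys.map (fun k =>
      k ++ " = " ++ PySem.Str.join " + "
        ((edges.filter (fun e => e.2.1 == k)).map (fun e => make_product_alt e.2.2 e.1)))
  "<br><strong>Functions</strong><p>" ++ PySem.Str.join "<br>" lines ++ "</p>"

-- ===== PRECONDITION & SPEC =====
def Spec_compute_functions (edges : List (String × String × String)) (out : String) : Prop := out = compute_functions_alt edges
instance (edges : List (String × String × String)) (out : String) : Decidable (Spec_compute_functions edges out) := by unfold Spec_compute_functions; infer_instance

-- ===== CLAIM (what is proved, stated in full; the proofs are below) =====
def Claim_equal_compute_functions : Prop := ∀ (edges : List (String × String × String)), Dom_compute_functions edges → Spec_compute_functions edges (compute_functions edges)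

-- ===== LEMMAS AND PROOFS =====

-- the intermediate grouping dict (proof device relating the two programs)
def pvGroup (edges : List (String × String × String)) : PySem.Dict String (List String) :=
  (edges.map (fun e => (e.2.1, make_product_alt e.2.2 e.1))).foldl
    (fun d p => d.modify p.1 [] (fun ps => ps ++ [p.2])) PySem.Dict.empty

-- the formatting that turns one (key, parts) entry into A's stored string
def pvFmt (p : String × List String) : String × String :=
  (p.1, p.1 ++ " = " ++ PySem.Str.join " + " p.2)

lemma pv_intercalate_append {α : Type} (s a : List α) (l : List (List α)) (h : l ≠ []) :
    List.intercalate s (l ++ [a]) = List.intercalate s l ++ s ++ a := by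
  induction l with
  | nil => exact absurd rfl h
  | cons b t ih =>
    cases t with
    | nil => simp [List.intercalate, List.intersperse]
    | cons c u =>
      have : List.intercalate s ((c :: u) ++ [a]) = List.intercalate s (c :: u) ++ s ++ a :=
        ih (by simp)
      simp only [List.cons_append]
      simp [List.intercalate, List.intersperse] at this ⊢
      simp [this]

lemma pv_join_append (ps : List String) (p : String) (h : ps ≠ []) :
    PySem.Str.join " + " (ps ++ [p]) = PySem.Str.join " + " ps ++ " + " ++ p := by
  apply String.toList_inj.mp
  simp only [PySem.Str.join, PySem.Chars.join, String.toList_append, String.toList_ofList,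
    List.map_append, List.map_cons, List.map_nil]
  rw [pv_intercalate_append _ _ _ (by simpa using h)]

lemma pv_join_singleton (p : String) : PySem.Str.join " + " [p] = p := by
  apply String.toList_inj.mp
  simp [PySem.Str.join, PySem.Chars.join, List.intercalate]

-- A's loop equals pvFmt mapped over the grouping loop
lemma pv_loop_rel :
    ∀ (edges : List (String × String × String)) (g : PySem.Dict String (List String)),
      g.keys.Nodup →
      (∀ q ∈ g.items, q.2 ≠ []) →
      edges.foldl (fun d edge =>
          if d.contains edge.2.1 then
            d.modify edge.2.1 "" (fun s => s ++ " + " ++ make_product edge.2.2 edge.1)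
          else
            d.insert edge.2.1 (edge.2.1 ++ " = " ++ make_product edge.2.2 edge.1))
        (PySem.Dict.mk (g.items.map pvFmt))
      = PySem.Dict.mk
          ((edges.foldl (fun d edge =>
              d.modify edge.2.1 [] (fun ps => ps ++ [make_product_alt edge.2.2 edge.1])) g).items.map pvFmt) := by
  intro edges
  induction edges with
  | nil => intro g _ _; rfl
  | cons e rest ih =>
    intro g hnd hne
    simp only [List.foldl_cons]
    set k := e.2.1 with hk
    set p := make_product e.2.2 e.1 with hp
    have hpalt : make_product_alt e.2.2 e.1 = p := rfl
    have hcont : (PySem.Dict.mk (g.items.map pvFmt)).contains k = g.contains k := by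
      simp [PySem.Dict.contains, List.any_map, pvFmt, Function.comp_def]
    have hstep :
        (if (PySem.Dict.mk (g.items.map pvFmt)).contains k then
            (PySem.Dict.mk (g.items.map pvFmt)).modify k "" (fun s => s ++ " + " ++ p)
          else
            (PySem.Dict.mk (g.items.map pvFmt)).insert k (k ++ " = " ++ p))
        = PySem.Dict.mk ((g.modify k [] (fun ps => ps ++ [p])).items.map pvFmt) := by
      by_cases hc : g.contains k = true
      · -- key already present
        have hsome : (g.items.find? (fun r => r.1 == k)).isSome := by
          rw [List.find?_isSome]
          simpa [PySem.Dict.contains, List.any_eq_true] using hc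
        obtain ⟨q, hfind⟩ := Option.isSome_iff_exists.mp hsome
        have hqk : q.1 = k := by
          have := List.find?_some hfind
          simpa using this
        have hqmem : q ∈ g.items := List.mem_of_find?_eq_some hfind
        have hqne : q.2 ≠ [] := hne q hqmem
        have hgget : g.get? k = some q.2 := by
          simp [PySem.Dict.get?, hfind]
        have hggetD : g.getD k [] = q.2 := by simp [PySem.Dict.getD, hgget]
        have hdget : (PySem.Dict.mk (g.items.map pvFmt)).get? k = some (pvFmt q).2 := by
          simp only [PySem.Dict.get?, List.find?_map]
          have : (fun (r : String × String) => r.1 == k) ∘ pvFmt = (fun r => r.1 == k) := by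
            funext r; simp [pvFmt]
          rw [this, hfind]; rfl
        have hdgetD : (PySem.Dict.mk (g.items.map pvFmt)).getD k ""
            = k ++ " = " ++ PySem.Str.join " + " q.2 := by
          simp [PySem.Dict.getD, hdget, pvFmt, hqk]
        rw [hcont, if_pos hc]
        simp only [PySem.Dict.modify, hdgetD, hggetD]
        have hc' : (PySem.Dict.mk (g.items.map pvFmt)).contains k = true := by rw [hcont]; exact hc
        apply PySem.Dict.ext
        rw [PySem.Dict.items_insert_of_contains _ _ hc', PySem.Dict.items_insert_of_contains _ _ hc]
        simp only [List.map_map]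
        apply List.map_congr_left
        intro r hr
        by_cases hrk : r.1 = k
        · simp only [Function.comp, pvFmt, hrk, beq_self_eq_true, if_true]
          have : PySem.Str.join " + " (q.2 ++ [p])
              = PySem.Str.join " + " q.2 ++ " + " ++ p := pv_join_append _ _ hqne
          simp [this, String.append_assoc]
        · simp [Function.comp, pvFmt, hrk]
      · -- new key
        have hc0 : g.contains k = false := by simpa using hc
        have hc0' : (PySem.Dict.mk (g.items.map pvFmt)).contains k = false := by
          rw [hcont]; exact hc0
        have hggetD : g.getD k [] = [] := PySem.Dict.getD_of_not_contains _ _ hc0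
        rw [hcont, if_neg (by simp [hc0])]
        simp only [PySem.Dict.modify, hggetD, List.nil_append]
        apply PySem.Dict.ext
        rw [PySem.Dict.items_insert_of_not_contains _ _ hc0',
            PySem.Dict.items_insert_of_not_contains _ _ hc0]
        simp [pvFmt, pv_join_singleton]
    rw [hstep, hpalt]
    exact ih (g.modify k [] (fun ps => ps ++ [p]))
      (by
        simp only [PySem.Dict.modify]
        exact PySem.Dict.nodup_keys_insert _ _ _ hnd)
      (by
        intro q hq
        simp only [PySem.Dict.modify] at hq
        rcases (PySem.Dict.mem_items_insert _ _ _ _).mp hq with h | h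
        · subst h; simp
        · exact hne q h.1)

-- ===== VERDICT (by name: the statement is the Claim_ definition above) =====
theorem compute_functions_spec : Claim_equal_compute_functions := by
  intro edges _
  unfold Spec_compute_functions compute_functions compute_functions_alt
  -- A's dict is pvFmt mapped over the grouping dict
  have hrel := pv_loop_rel edges PySem.Dict.empty (by simp [PySem.Dict.empty, PySem.Dict.keys])
    (by intro q hq; simp [PySem.Dict.empty] at hq)
  have hempty : PySem.Dict.mk ((PySem.Dict.empty : PySem.Dict String (List String)).items.map pvFmt)
      = (PySem.Dict.empty : PySem.Dict String String) := rfl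
  rw [hempty] at hrel
  -- the grouping loop over edges IS pvGroup (fold over the mapped pair list)
  have hgrp : (edges.foldl (fun d edge =>
        d.modify edge.2.1 [] (fun ps => ps ++ [make_product_alt edge.2.2 edge.1]))
      (PySem.Dict.empty : PySem.Dict String (List String))) = pvGroup edges := by
    unfold pvGroup
    rw [List.foldl_map]
  rw [hgrp] at hrel
  simp only [hrel]
  -- characterise pvGroup: keys and per-key values
  have hnd : (pvGroup edges).keys.Nodup := by
    unfold pvGroup
    exact PySem.Dict.nodup_keys_foldl_modify_key
      (edges.map (fun e => (e.2.1, make_product_alt e.2.2 e.1))) Prod.fst []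
      (fun _ p ps => ps ++ [p.2]) PySem.Dict.empty (by simp [PySem.Dict.keys, PySem.Dict.empty])
  have hkeys : (pvGroup edges).keys
      = edges.foldl (fun ks e => if ks.contains e.2.1 then ks else ks ++ [e.2.1]) [] := by
    unfold pvGroup
    rw [PySem.Dict.keys_foldl_modify_key]
    simp only [PySem.Dict.keys, PySem.Dict.empty, List.map_nil, List.map_map]
    rw [PySem.Set.update, List.foldl_map]
    simp [PySem.Set.add]
  have hget : ∀ k, (pvGroup edges).getD k []
      = (edges.filter (fun e => e.2.1 == k)).map (fun e => make_product_alt e.2.2 e.1) := by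
    intro k
    unfold pvGroup
    rw [PySem.Dict.getD_foldl_modify_append]
    simp [PySem.Dict.empty, PySem.Dict.getD, PySem.Dict.get?, List.filter_map, Function.comp_def]
  -- turn A's rendering (keys → getD over the pvFmt dict) into items, then into B's lines
  have hndA : (PySem.Dict.mk ((pvGroup edges).items.map pvFmt)).keys.Nodup := by
    simpa [PySem.Dict.keys, PySem.Dict.items, List.map_map, pvFmt, Function.comp] using hnd
  have hitems := PySem.Dict.items_eq_map_keys (PySem.Dict.mk ((pvGroup edges).items.map pvFmt)) hndA ""
  have hvals : (PySem.Dict.mk ((pvGroup edges).items.map pvFmt)).keys.map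
        (fun k => (PySem.Dict.mk ((pvGroup edges).items.map pvFmt)).getD k "")
      = (PySem.Dict.mk ((pvGroup edges).items.map pvFmt)).items.map (fun q => q.2) := by
    rw [hitems]; simp [List.map_map, Function.comp]
  rw [hvals]
  have hitemsG := PySem.Dict.items_eq_map_keys (pvGroup edges) hnd []
  simp only [List.map_map]
  rw [hitemsG]
  simp only [List.map_map, Function.comp_def, pvFmt]
  simp only [hkeys, hget]
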